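-- pv_equiv track=rewrite | github.com/cmscom/lsh-cascade-poc | src/lsh.py | chunk_hash
-- ===== SOURCE A (Python) =====
-- def chunk_hash(simhash_int: int, num_chunks: int) -> list[str]:
--     """Split a hash into chunks for indexing.
--
--     Divides the 128-bit hash into num_chunks equal parts and returns
--     them as prefixed hex strings for use in inverted index lookups.
--
--     Args:
--         simhash_int: Hash value as integer.
--         num_chunks: Number of chunks (4, 8, or 16).
--
--     Returns:
--         List of prefixed hex strings like ["c0_A1B2C3D4", "c1_E5F6G7H8", ...].
--
--     Raises:
--         ValueError: If 128 is not divisible by num_chunks.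
--     """
--     hash_bits = 128
--
--     if hash_bits % num_chunks != 0:
--         raise ValueError(f"128 must be divisible by num_chunks ({num_chunks})")
--
--     bits_per_chunk = hash_bits // num_chunks
--     mask = (1 << bits_per_chunk) - 1
--
--     chunks = []
--     for i in range(num_chunks):
--         # Extract chunk from right to left
--         chunk_idx = num_chunks - 1 - i
--         chunk_value = (simhash_int >> (i * bits_per_chunk)) & mask
--
--         # Format as hex with prefix
--         hex_width = bits_per_chunk // 4
--         hex_str = f"c{chunk_idx}_{chunk_value:0{hex_width}X}"
--         chunks.append(hex_str)
--
--     # Reverse to get c0, c1, c2, ... order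
--     chunks.reverse()
--
--     return chunks
-- ===== SOURCE B (Python) =====
-- def chunk_hash(simhash_int: int, num_chunks: int) -> list[str]:
--     """Split a 128-bit hash into num_chunks prefixed hex-string chunks.
--
--     Renders the whole (masked) value as one 32-digit uppercase hex string
--     and slices it, instead of per-chunk shift/mask extraction.
--
--     Raises:
--         ValueError: if num_chunks is not a positive divisor of 128 whose
--         chunk width is a whole number of hex digits.
--     """
--     if num_chunks <= 0 or 128 % num_chunks != 0 or (128 // num_chunks) % 4 != 0:
--         raise ValueError(f"128 must be divisible by num_chunks ({num_chunks})")
--     hex_width = 128 // num_chunks // 4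
--     hstr = f"{simhash_int & ((1 << 128) - 1):032X}"
--     return [f"c{j}_{hstr[j * hex_width:(j + 1) * hex_width]}"
--             for j in range(num_chunks)]
-- ===== Notes on version B (the rewrite author's own statement) =====
-- stated objective: idiomatic
-- what changed: Instead of per-chunk shift/mask extraction with a reversing pass, B formats the 128-bit-masked value once as a 32-digit uppercase hex string and slices it left-to-right into equal substrings.
import Mathlib
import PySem

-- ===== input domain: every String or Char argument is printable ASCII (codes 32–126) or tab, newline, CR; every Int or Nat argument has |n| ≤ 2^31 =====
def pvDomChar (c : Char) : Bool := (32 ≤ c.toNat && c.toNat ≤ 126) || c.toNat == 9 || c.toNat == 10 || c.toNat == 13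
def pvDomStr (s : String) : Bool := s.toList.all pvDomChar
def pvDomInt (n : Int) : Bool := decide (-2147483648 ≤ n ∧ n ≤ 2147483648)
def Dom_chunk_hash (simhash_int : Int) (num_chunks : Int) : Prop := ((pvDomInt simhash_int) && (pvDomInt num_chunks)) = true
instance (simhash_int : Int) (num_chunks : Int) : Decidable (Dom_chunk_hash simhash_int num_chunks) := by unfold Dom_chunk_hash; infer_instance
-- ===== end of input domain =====

-- B renders the 128-bit-masked value once as one 32-digit uppercase hex string and slices it,
-- instead of A's per-chunk shift/mask extraction followed by a reversing pass (objective: idiomatic).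

-- ===== PORT A =====

-- f"{d:X}" digit: exact for 0 ≤ d < 16
def pyHexDigit (d : Nat) : Char := if d < 10 then Char.ofNat (48 + d) else Char.ofNat (55 + d)

-- uppercase hex digits of v (minimal width); exact port of CPython's hex rendering of a nonnegative int
def pyHexChars (v : Nat) : List Char :=
  if h : v < 16 then [pyHexDigit v]
  else pyHexChars (v / 16) ++ [pyHexDigit (v % 16)]
decreasing_by exact Nat.div_lt_self (by omega) (by omega)

-- f"{v:0{w}X}" for v ≥ 0: minimal hex digits left-padded with '0' to width w (exact for nonnegative v)
def pyHexPad (v w : Nat) : List Char :=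
  List.replicate (w - (pyHexChars v).length) '0' ++ pyHexChars v

def chunk_hash (simhash_int : Int) (num_chunks : Int) : List String :=
  -- hash_bits = 128; the guards returning [] are where the Python raises (outside Pre_)
  if num_chunks = 0 then []                                -- ZeroDivisionError in `128 % num_chunks`
  else if PySem.Int.mod 128 num_chunks ≠ 0 then []         -- raise ValueError
  else
    let bits_per_chunk := PySem.Int.floordiv 128 num_chunks
    let mask : Int := (1 <<< bits_per_chunk.toNat) - 1     -- negative shift (outside Pre_) clamped: junk outside Pre_
    let chunks := (PySem.List.pyRange 0 num_chunks 1).foldl (fun acc i =>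
      let chunk_idx := num_chunks - 1 - i
      let chunk_value := PySem.Int.band (simhash_int >>> (i * bits_per_chunk).toNat) mask
      let hex_width := PySem.Int.floordiv bits_per_chunk 4
      let hex_str := "c" ++ PySem.Int.toStr chunk_idx ++ "_" ++ String.mk (pyHexPad chunk_value.toNat hex_width.toNat)
      acc ++ [hex_str]) []
    chunks.reverse

-- ===== PORT B =====

def chunk_hash_alt (simhash_int : Int) (num_chunks : Int) : List String :=
  -- the guard returning [] is where B raises ValueError (outside Pre_)
  if num_chunks ≤ 0 ∨ PySem.Int.mod 128 num_chunks ≠ 0 ∨ PySem.Int.mod (PySem.Int.floordiv 128 num_chunks) 4 ≠ 0 then []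
  else
    let hex_width := PySem.Int.floordiv (PySem.Int.floordiv 128 num_chunks) 4
    let hstr := pyHexPad (PySem.Int.band simhash_int ((1 <<< 128) - 1)).toNat 32   -- f"{… & (1<<128)-1:032X}"
    (PySem.List.pyRange 0 num_chunks 1).map (fun j =>
      "c" ++ PySem.Int.toStr j ++ "_" ++ String.mk (PySem.List.slice hstr (some (j * hex_width)) (some ((j + 1) * hex_width))))

-- ===== PRECONDITION & SPEC =====
-- Pre_ excludes the inputs where A raises (num_chunks not a positive divisor of 128: ValueError /
-- ZeroDivisionError / negative-shift ValueError), and additionally num_chunks ∈ {64, 128} — chunks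
-- narrower than one hex digit, where A still returns (its zero-width format pads nothing) but B's
-- hex-string slicing raises ValueError, as a chunk is then not a whole number of hex digits.
def Pre_chunk_hash (simhash_int : Int) (num_chunks : Int) : Prop :=
  0 < num_chunks ∧ PySem.Int.mod 128 num_chunks = 0 ∧
    PySem.Int.mod (PySem.Int.floordiv 128 num_chunks) 4 = 0
instance (simhash_int : Int) (num_chunks : Int) : Decidable (Pre_chunk_hash simhash_int num_chunks) := by unfold Pre_chunk_hash; infer_instance
def pvWitness_chunk_hash : Int × Int := (123456789, 8)

def Spec_chunk_hash (simhash_int : Int) (num_chunks : Int) (out : List String) : Prop := out = chunk_hash_alt simhash_int num_chunks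
instance (simhash_int : Int) (num_chunks : Int) (out : List String) : Decidable (Spec_chunk_hash simhash_int num_chunks out) := by unfold Spec_chunk_hash; infer_instance

-- ===== CLAIM (what is proved, stated in full; the proofs are below) =====
def Claim_equal_chunk_hash : Prop := ∀ (simhash_int : Int) (num_chunks : Int), Dom_chunk_hash simhash_int num_chunks → Pre_chunk_hash simhash_int num_chunks → Spec_chunk_hash simhash_int num_chunks (chunk_hash simhash_int num_chunks)

-- ===== LEMMAS AND PROOFS =====

-- exactly-w-hex-digit rendering (proof-side normal form of both ports' strings)
def exactHex : Nat → Nat → List Char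
  | 0, _ => []
  | w + 1, v => exactHex w (v / 16) ++ [pyHexDigit (v % 16)]

theorem exactHex_length (w v : Nat) : (exactHex w v).length = w := by
  induction w generalizing v with
  | zero => rfl
  | succ w ih => simp [exactHex, ih]

theorem exactHex_zero (w : Nat) : exactHex w 0 = List.replicate w '0' := by
  induction w with
  | zero => rfl
  | succ w ih => simp [exactHex, ih, pyHexDigit, List.replicate_succ']

theorem pyHexPad_eq_exactHex (w v : Nat) (hw : 0 < w) (hv : v < 16 ^ w) :
    pyHexPad v w = exactHex w v := by
  induction w generalizing v with
  | zero => omega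
  | succ w ih =>
      by_cases h16 : v < 16
      · have h1 : pyHexChars v = [pyHexDigit v] := by rw [pyHexChars, dif_pos h16]
        have h2 : v / 16 = 0 := Nat.div_eq_of_lt h16
        have h3 : v % 16 = v := Nat.mod_eq_of_lt h16
        simp [pyHexPad, h1, exactHex, h2, h3, exactHex_zero]
      · have hw' : 0 < w := by
          rcases Nat.eq_zero_or_pos w with h | h
          · subst h; simp at hv; omega
          · exact h
        have hdiv : v / 16 < 16 ^ w := by
          rw [pow_succ] at hv
          exact Nat.div_lt_of_lt_mul (by omega)
        have h1 : pyHexChars v = pyHexChars (v / 16) ++ [pyHexDigit (v % 16)] := by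
          rw [pyHexChars, dif_neg h16]
        calc pyHexPad v (w + 1)
            = List.replicate (w - (pyHexChars (v / 16)).length) '0' ++
                (pyHexChars (v / 16) ++ [pyHexDigit (v % 16)]) := by
              simp [pyHexPad, h1]
          _ = pyHexPad (v / 16) w ++ [pyHexDigit (v % 16)] := by
              simp [pyHexPad]
          _ = exactHex w (v / 16) ++ [pyHexDigit (v % 16)] := by rw [ih _ hw' hdiv]
          _ = exactHex (w + 1) v := rfl

theorem exactHex_add (u w v : Nat) :
    exactHex (u + w) v = exactHex u (v / 16 ^ w) ++ exactHex w (v % 16 ^ w) := by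
  induction w generalizing v with
  | zero => simp [exactHex]
  | succ w ih =>
      have e1 : v / 16 / 16 ^ w = v / 16 ^ (w + 1) := by
        rw [Nat.div_div_eq_div_mul, ← pow_succ']
      have e2 : v / 16 % 16 ^ w = v % 16 ^ (w + 1) / 16 := by
        rw [pow_succ']
        exact (Nat.mod_mul_right_div_self v 16 (16 ^ w)).symm
      have e3 : v % 16 ^ (w + 1) % 16 = v % 16 := by
        exact Nat.mod_mod_of_dvd v (dvd_pow_self 16 (by omega))
      show exactHex (u + w) (v / 16) ++ [pyHexDigit (v % 16)] = _
      rw [ih (v / 16), e1, e2]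
      show _ = _ ++ (exactHex w (v % 16 ^ (w + 1) / 16) ++ [pyHexDigit (v % 16 ^ (w + 1) % 16)])
      rw [e3, List.append_assoc]

theorem exactHex_slice (M u w r : Nat) :
    ((exactHex (u + (w + r)) M).drop u).take w = exactHex w (M / 16 ^ r % 16 ^ w) := by
  rw [exactHex_add u (w + r) M, List.drop_left' (exactHex_length u _)]
  rw [exactHex_add w r (M % 16 ^ (w + r))]
  rw [List.take_left' (exactHex_length w _)]
  congr 1
  have h16 : (16 : Nat) ^ (w + r) = 16 ^ r * 16 ^ w := by rw [← pow_add, add_comm]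
  rw [h16]
  exact Nat.mod_mul_right_div_self M (16 ^ r) (16 ^ w)

-- Python's  x & (2**t - 1)  is  x mod 2**t , also for negative x (infinite two's complement)
theorem band_mask (x : Int) (t : Nat) :
    PySem.Int.band x ((2 : Int) ^ t - 1) = x % (2 : Int) ^ t := by
  have h2t : ((2 ^ t : Nat) : Int) = (2 : Int) ^ t := by push_cast; ring
  have h1le : (1 : Nat) ≤ 2 ^ t := Nat.one_le_two_pow
  have hmask : ((2 : Int) ^ t - 1) = ((2 ^ t - 1 : Nat) : Int) := by
    push_cast [h1le]; ring
  by_cases hx : 0 ≤ x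
  · rw [hmask, PySem.Int.band_of_nonneg hx (by positivity)]
    rw [Int.toNat_natCast, Nat.and_two_pow_sub_one_eq_mod]
    conv_rhs => rw [← Int.toNat_of_nonneg hx, ← h2t]
    exact_mod_cast rfl
  · rw [PySem.Int.band]
    rw [if_neg (by omega), if_pos (by rw [hmask]; positivity)]
    have hy : ((-x - 1).toNat : Int) = -x - 1 := Int.toNat_of_nonneg (by omega)
    set y : Nat := (-x - 1).toNat with hy'
    have hxy : x = -(y : Int) - 1 := by omega
    have hmt : ((2 : Int) ^ t - 1).toNat = 2 ^ t - 1 := by rw [hmask, Int.toNat_natCast]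
    rw [hmt, Nat.and_comm, Nat.and_two_pow_sub_one_eq_mod]
    have hr : y % 2 ^ t < 2 ^ t := Nat.mod_lt _ (by positivity)
    have hrZ : ((y % 2 ^ t : Nat) : Int) < (2 : Int) ^ t := by rw [← h2t]; exact_mod_cast hr
    have hrZ0 : (0 : Int) ≤ ((y % 2 ^ t : Nat) : Int) := by positivity
    have hsub : ((2 ^ t - 1 - y % 2 ^ t : Nat) : Int) =
        ((2 ^ t : Nat) : Int) - 1 - ((y % 2 ^ t : Nat) : Int) := by omega
    rw [hsub, h2t]
    have hqZ : (2 : Int) ^ t * ((y / 2 ^ t : Nat) : Int) + ((y % 2 ^ t : Nat) : Int) = (y : Int) := by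
      rw [← h2t]; exact_mod_cast Nat.div_add_mod y (2 ^ t)
    have key : x = ((2 : Int) ^ t - 1 - ((y % 2 ^ t : Nat) : Int)) +
        (2 : Int) ^ t * (-(((y / 2 ^ t : Nat) : Int)) - 1) := by
      rw [hxy]; linear_combination hqZ
    rw [key, Int.add_mul_emod_self_left]
    have h1Z : (1 : Int) ≤ (2 : Int) ^ t := one_le_pow₀ (by norm_num)
    exact (Int.emod_eq_of_lt (by linarith) (by linarith)).symm

-- Python's  (x >> a) & (2**t - 1)  seen through x's low 128 bits
theorem chunkval (s : Int) (a t : Nat) (h : a + t ≤ 128) :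
    PySem.Int.band (s >>> a) ((1 <<< t : Int) - 1) =
      (((s % (2 : Int) ^ 128).toNat / 2 ^ a % 2 ^ t : Nat) : Int) := by
  have hsl : (1 <<< t : Int) = 2 ^ t := by simp [Int.shiftLeft_eq]
  rw [hsl, band_mask]
  set M : Nat := (s % (2 : Int) ^ 128).toNat with hM
  have hMeq : (M : Int) = s % (2 : Int) ^ 128 :=
    Int.toNat_of_nonneg (Int.emod_nonneg s (by positivity))
  set X : Int := (2 : Int) ^ a with hX
  set Y : Int := (2 : Int) ^ (128 - a) with hY
  set T : Int := (2 : Int) ^ t with hT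
  set Z : Int := (2 : Int) ^ (128 - a - t) with hZ
  have hXY : (2 : Int) ^ 128 = X * Y := by rw [hX, hY, ← pow_add]; congr 1; omega
  have hTZ : Y = T * Z := by rw [hY, hT, hZ, ← pow_add]; congr 1; omega
  have hX0 : X ≠ 0 := by positivity
  have hdk : s = (M : Int) + s / (X * Y) * (X * Y) := by
    rw [← hXY, hMeq]
    have := Int.emod_add_ediv s ((2 : Int) ^ 128)
    linarith [this]
  have hca : ((2 ^ a : Nat) : Int) = X := by rw [hX]; push_cast; ring
  have hshift : s >>> a = (M : Int) / X + s / (X * Y) * Y := by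
    rw [Int.shiftRight_eq_div_pow, hca]
    conv_lhs => rw [hdk]
    rw [show (M : Int) + s / (X * Y) * (X * Y) = (M : Int) + (s / (X * Y) * Y) * X by ring]
    rw [Int.add_mul_ediv_right _ _ hX0]
  rw [hshift, hTZ,
    show (M : Int) / X + s / (X * (T * Z)) * (T * Z) =
      (M : Int) / X + T * (s / (X * (T * Z)) * Z) by ring,
    Int.add_mul_emod_self_left]
  have hdivc : ((M / 2 ^ a : Nat) : Int) = (M : Int) / X := by
    rw [← hca]; exact_mod_cast rfl
  have hmodc : ((M / 2 ^ a % 2 ^ t : Nat) : Int) = ((M / 2 ^ a : Nat) : Int) % T := by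
    rw [hT, show ((2 : Int) ^ t) = ((2 ^ t : Nat) : Int) by push_cast; ring]
    exact_mod_cast rfl
  rw [hmodc, hdivc]

-- common normal form of both ports' results
def hexSpec (s : Int) (k w : Nat) : List String :=
  (List.range k).map (fun (j : Nat) =>
    "c" ++ PySem.Int.toStr ((j : Int)) ++ "_" ++
      String.mk (exactHex w ((s % (2 : Int) ^ 128).toNat / 16 ^ ((k - 1 - j) * w) % 16 ^ w)))

theorem rev_map_range {α : Type} (g : Nat → α) (k : Nat) :
    ((List.range k).map g).reverse = (List.range k).map (fun j => g (k - 1 - j)) := by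
  apply List.ext_getElem (by simp)
  intro i h1 h2
  simp only [List.getElem_reverse, List.getElem_map, List.getElem_range]
  simp only [List.length_reverse, List.length_map, List.length_range] at h1 h2
  congr 1
  simp

theorem lemA (s : Int) (k w : Nat) (hk : 0 < k) (hw : 0 < w) (hkw : k * (4 * w) = 128) :
    chunk_hash s (k : Int) = hexSpec s k w := by
  have hk0 : (k : Int) ≠ 0 := by exact_mod_cast hk.ne'
  have h128 : (128 : Int) = (k : Int) * ((4 * w : Nat) : Int) := by exact_mod_cast hkw.symm
  have hmod : PySem.Int.mod 128 (k : Int) = 0 := by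
    rw [PySem.Int.mod, Int.fmod_eq_emod, if_pos (Or.inl (by positivity)), add_zero]
    exact Int.emod_eq_zero_of_dvd ⟨_, h128⟩
  have hdiv : PySem.Int.floordiv 128 (k : Int) = ((4 * w : Nat) : Int) := by
    rw [PySem.Int.floordiv, Int.fdiv_eq_ediv, if_pos (Or.inl (by positivity)), sub_zero]
    rw [h128]
    exact Int.mul_ediv_cancel_left _ hk0
  have hw4 : PySem.Int.floordiv ((4 * w : Nat) : Int) 4 = (w : Int) := by
    rw [PySem.Int.floordiv, Int.fdiv_eq_ediv, if_pos (Or.inl (by norm_num)), sub_zero]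
    rw [show ((4 * w : Nat) : Int) = 4 * (w : Int) by push_cast; ring]
    exact Int.mul_ediv_cancel_left _ (by norm_num)
  unfold chunk_hash
  rw [if_neg hk0, if_neg (by simp [hmod])]
  simp only [hdiv, hw4, Int.toNat_natCast, PySem.List.pyRange_zero_natCast]
  rw [List.foldl_map, PySem.List.foldl_append_singleton_eq_map, List.nil_append]
  rw [rev_map_range]
  unfold hexSpec
  apply List.map_congr_left
  intro j hj
  rw [List.mem_range] at hj
  have e1 : ((k : Int) - 1 - ((k - 1 - j : Nat) : Int)) = (j : Int) := by omega
  rw [e1]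
  have e2 : (((k - 1 - j : Nat) : Int) * ((4 * w : Nat) : Int)).toNat = (k - 1 - j) * (4 * w) := by
    rw [← Nat.cast_mul, Int.toNat_natCast]
  have hle : (k - 1 - j) * (4 * w) + 4 * w ≤ 128 := by
    have h1 : (k - 1 - j) + 1 ≤ k := by omega
    calc (k - 1 - j) * (4 * w) + 4 * w = ((k - 1 - j) + 1) * (4 * w) := by ring
      _ ≤ k * (4 * w) := Nat.mul_le_mul_right _ h1
      _ = 128 := hkw
  rw [e2, chunkval s ((k - 1 - j) * (4 * w)) (4 * w) hle, Int.toNat_natCast]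
  have h16a : (16 : Nat) ^ ((k - 1 - j) * w) = 2 ^ ((k - 1 - j) * (4 * w)) := by
    rw [show (16 : Nat) = 2 ^ 4 from by norm_num, ← pow_mul]
    congr 1
    ring
  have h16b : (16 : Nat) ^ w = 2 ^ (4 * w) := by
    rw [show (16 : Nat) = 2 ^ 4 from by norm_num, ← pow_mul]
  have hbound : (s % (2 : Int) ^ 128).toNat / 2 ^ ((k - 1 - j) * (4 * w)) % 2 ^ (4 * w) < 16 ^ w := by
    rw [h16b]
    exact Nat.mod_lt _ (by positivity)
  rw [pyHexPad_eq_exactHex w _ hw hbound, h16a, h16b]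

theorem lemB (s : Int) (k w : Nat) (hk : 0 < k) (hw : 0 < w) (hkw : k * (4 * w) = 128) :
    chunk_hash_alt s (k : Int) = hexSpec s k w := by
  have hk0 : (k : Int) ≠ 0 := by exact_mod_cast hk.ne'
  have h128 : (128 : Int) = (k : Int) * ((4 * w : Nat) : Int) := by exact_mod_cast hkw.symm
  have hmod : PySem.Int.mod 128 (k : Int) = 0 := by
    rw [PySem.Int.mod, Int.fmod_eq_emod, if_pos (Or.inl (by positivity)), add_zero]
    exact Int.emod_eq_zero_of_dvd ⟨_, h128⟩
  have hdiv : PySem.Int.floordiv 128 (k : Int) = ((4 * w : Nat) : Int) := by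
    rw [PySem.Int.floordiv, Int.fdiv_eq_ediv, if_pos (Or.inl (by positivity)), sub_zero]
    rw [h128]
    exact Int.mul_ediv_cancel_left _ hk0
  have hw4 : PySem.Int.floordiv ((4 * w : Nat) : Int) 4 = (w : Int) := by
    rw [PySem.Int.floordiv, Int.fdiv_eq_ediv, if_pos (Or.inl (by norm_num)), sub_zero]
    rw [show ((4 * w : Nat) : Int) = 4 * (w : Int) by push_cast; ring]
    exact Int.mul_ediv_cancel_left _ (by norm_num)
  have hmod4 : PySem.Int.mod (PySem.Int.floordiv 128 (k : Int)) 4 = 0 := by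
    rw [hdiv, PySem.Int.mod, Int.fmod_eq_emod, if_pos (Or.inl (by norm_num)), add_zero]
    exact Int.emod_eq_zero_of_dvd ⟨(w : Int), by push_cast; ring⟩
  have hkw32 : k * w = 32 := by
    have h4 : 4 * (k * w) = 128 := by rw [← hkw]; ring
    omega
  have hmask128 : ((1 <<< 128 : Int)) - 1 = (2 : Int) ^ 128 - 1 := by
    norm_num [Int.shiftLeft_eq]
  have hband : (PySem.Int.band s ((1 <<< 128 : Int) - 1)).toNat = (s % (2 : Int) ^ 128).toNat := by
    rw [hmask128, band_mask]
  have hMlt : (s % (2 : Int) ^ 128).toNat < 16 ^ 32 := by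
    have h1 : s % (2 : Int) ^ 128 < (2 : Int) ^ 128 := Int.emod_lt_of_pos s (by positivity)
    have h2 : (16 : Nat) ^ 32 = 2 ^ 128 := by norm_num
    rw [h2]
    exact (Int.toNat_lt (Int.emod_nonneg s (by positivity))).mpr (by exact_mod_cast h1)
  unfold chunk_hash_alt
  rw [if_neg (by push_neg; exact ⟨by positivity, hmod, hmod4⟩)]
  simp only [hdiv, hw4, PySem.List.pyRange_zero_natCast, List.map_map]
  rw [hband, pyHexPad_eq_exactHex 32 _ (by norm_num) hMlt]
  unfold hexSpec
  apply List.map_congr_left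
  intro j hj
  rw [List.mem_range] at hj
  simp only [Function.comp]
  have ha : ((j : Int) * (w : Int)).toNat = j * w := by
    rw [← Nat.cast_mul, Int.toNat_natCast]
  have hb : (((j : Int) + 1) * (w : Int)).toNat = (j + 1) * w := by
    rw [show ((j : Int) + 1) * (w : Int) = (((j + 1) * w : Nat) : Int) by push_cast; ring,
      Int.toNat_natCast]
  rw [PySem.List.slice_toNat _ (by positivity) (by positivity), ha, hb]
  have hsub : (j + 1) * w - j * w = w := by
    rw [show (j + 1) * w = j * w + w from by ring]
    omega
  rw [hsub]
  have h32 : (32 : Nat) = j * w + (w + (k - 1 - j) * w) := by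
    have hsum : j + 1 + (k - 1 - j) = k := by omega
    calc (32 : Nat) = k * w := hkw32.symm
      _ = (j + 1 + (k - 1 - j)) * w := by rw [hsum]
      _ = j * w + (w + (k - 1 - j) * w) := by ring
  rw [h32, exactHex_slice]

-- ===== VERDICT (by name: the statement is the Claim_ definition above) =====
theorem chunk_hash_spec : Claim_equal_chunk_hash := by
  intro s n _hDom hPre
  unfold Spec_chunk_hash
  obtain ⟨hn, h1, h2⟩ := hPre
  have hdvd : n ∣ 128 := by
    apply Int.dvd_of_emod_eq_zero
    rw [PySem.Int.mod, Int.fmod_eq_emod, if_pos (Or.inl (le_of_lt hn)), add_zero] at h1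
    exact h1
  have hle : n ≤ 128 := Int.le_of_dvd (by norm_num) hdvd
  have h1' : PySem.Int.mod 128 n = 0 := h1
  have key : n = 1 ∨ n = 2 ∨ n = 4 ∨ n = 8 ∨ n = 16 ∨ n = 32 := by
    interval_cases n <;> revert h1' h2 <;> decide
  rcases key with h | h | h | h | h | h <;> subst h
  · exact (lemA s 1 32 (by norm_num) (by norm_num) (by norm_num)).trans
      (lemB s 1 32 (by norm_num) (by norm_num) (by norm_num)).symm
  · exact (lemA s 2 16 (by norm_num) (by norm_num) (by norm_num)).trans
      (lemB s 2 16 (by norm_num) (by norm_num) (by norm_num)).symm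
  · exact (lemA s 4 8 (by norm_num) (by norm_num) (by norm_num)).trans
      (lemB s 4 8 (by norm_num) (by norm_num) (by norm_num)).symm
  · exact (lemA s 8 4 (by norm_num) (by norm_num) (by norm_num)).trans
      (lemB s 8 4 (by norm_num) (by norm_num) (by norm_num)).symm
  · exact (lemA s 16 2 (by norm_num) (by norm_num) (by norm_num)).trans
      (lemB s 16 2 (by norm_num) (by norm_num) (by norm_num)).symm
  · exact (lemA s 32 1 (by norm_num) (by norm_num) (by norm_num)).trans
      (lemB s 32 1 (by norm_num) (by norm_num) (by norm_num)).symm
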